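-- pv_equiv track=rewrite | github.com/Lorewitch/archive | tools/build_archive.py | languages_from_text
-- ===== SOURCE A (Python) =====
-- from typing import Any
--
-- LANGS = ["ru", "en", "zh"]
--
-- def languages_from_text(text_by_lang: dict[str, str] | None = None, volumes: list[dict[str, Any]] | None = None) -> list[str]:
--     found: list[str] = []
--     for lang in LANGS:
--         has_text = False
--         if text_by_lang and str(text_by_lang.get(lang, "")).strip():
--             has_text = True
--         if volumes and any(str(volume.get("text", {}).get(lang, "")).strip() for volume in volumes):
--             has_text = True
--         if has_text:
--             found.append(lang)
--     return found or LANGS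
-- ===== SOURCE B (Python) =====
-- from typing import Any
--
-- LANGS = ["ru", "en", "zh"]
--
-- def languages_from_text(text_by_lang: dict[str, str] | None = None, volumes: list[dict[str, Any]] | None = None) -> list[str]:
--     has: set[str] = set()
--     if volumes:
--         for volume in volumes:
--             textmap = volume.get("text", {})
--             for lang in LANGS:
--                 if str(textmap.get(lang, "")).strip():
--                     has.add(lang)
--     if text_by_lang:
--         for lang in LANGS:
--             if str(text_by_lang.get(lang, "")).strip():
--                 has.add(lang)
--     return [l for l in LANGS if l in has] or LANGS
-- ===== Notes on version B (the rewrite author's own statement) =====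
-- stated objective: alternative
-- what changed: Inverted the loop nesting: instead of re-scanning all volumes once per language, B makes a single pass over volumes (and one over text_by_lang) filling a set of languages with non-empty stripped text, then filters LANGS by set membership with the same empty-result fallback.
import Mathlib
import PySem

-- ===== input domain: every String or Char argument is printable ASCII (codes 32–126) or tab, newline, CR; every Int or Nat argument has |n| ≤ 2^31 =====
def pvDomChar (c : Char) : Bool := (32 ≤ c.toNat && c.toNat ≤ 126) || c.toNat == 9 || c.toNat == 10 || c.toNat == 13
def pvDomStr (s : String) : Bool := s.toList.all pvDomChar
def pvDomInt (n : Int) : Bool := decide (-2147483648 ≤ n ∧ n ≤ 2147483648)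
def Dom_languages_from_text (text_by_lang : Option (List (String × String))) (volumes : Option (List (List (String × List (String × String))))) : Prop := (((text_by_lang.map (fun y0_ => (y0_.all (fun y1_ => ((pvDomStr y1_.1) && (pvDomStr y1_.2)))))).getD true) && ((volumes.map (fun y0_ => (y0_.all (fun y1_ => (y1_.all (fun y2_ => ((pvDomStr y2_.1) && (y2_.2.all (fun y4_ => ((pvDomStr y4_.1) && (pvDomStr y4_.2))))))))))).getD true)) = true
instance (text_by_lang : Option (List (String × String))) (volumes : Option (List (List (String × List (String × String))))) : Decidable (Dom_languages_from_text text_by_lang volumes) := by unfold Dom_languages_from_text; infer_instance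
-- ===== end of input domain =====

-- B inverts the traversal: one pass over volumes filling a set of found languages, instead of
-- re-scanning all volumes once per language; objective: alternative decomposition.

-- shared helpers (both Pythons use dict.get(k, default) and str(...).strip() truthiness)
def pvAssocGetD {β : Type} (d : List (String × β)) (k : String) (dflt : β) : β :=
  match d.find? (fun p => p.1 == k) with
  | some p => p.2
  | none => dflt

def pvTruthyStripped (s : String) : Bool := !(PySem.Str.strip s).toList.isEmpty

def pvLANGS : List String := ["ru", "en", "zh"]

-- ===== PORT A =====
-- A-side helpers: the two 'if' conditions of A's loop body, named for readability
def pvCondTbl (text_by_lang : Option (List (String × String))) (lang : String) : Bool :=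
  match text_by_lang with
  | none => false
  | some d => !d.isEmpty && pvTruthyStripped (pvAssocGetD d lang "")

def pvCondVols (volumes : Option (List (List (String × List (String × String))))) (lang : String) : Bool :=
  match volumes with
  | none => false
  | some vs => !vs.isEmpty &&
      vs.any (fun volume => pvTruthyStripped (pvAssocGetD (pvAssocGetD volume "text" []) lang ""))

def languages_from_text (text_by_lang : Option (List (String × String))) (volumes : Option (List (List (String × List (String × String))))) : List String :=
  let found : List String :=
    pvLANGS.foldl (fun found lang =>
      let has_text := false
      let has_text := if pvCondTbl text_by_lang lang then true else has_text
      let has_text := if pvCondVols volumes lang then true else has_text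
      if has_text then found ++ [lang] else found) []
  if found.isEmpty then pvLANGS else found

-- ===== PORT B =====
-- B-side helpers: the set of languages with non-empty text, built volumes-first
def pvVolSet (volumes : Option (List (List (String × List (String × String))))) : PySem.Set String :=
  match volumes with
  | none => PySem.Set.empty
  | some vs =>
    if vs.isEmpty then PySem.Set.empty else
      vs.foldl (fun acc volume =>
        let textmap := pvAssocGetD volume "text" []
        pvLANGS.foldl (fun acc lang =>
          if pvTruthyStripped (pvAssocGetD textmap lang "") then PySem.Set.add acc lang else acc) acc)
        PySem.Set.empty

def pvHasSet (text_by_lang : Option (List (String × String))) (volumes : Option (List (List (String × List (String × String))))) : PySem.Set String :=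
  match text_by_lang with
  | none => pvVolSet volumes
  | some d =>
    if d.isEmpty then pvVolSet volumes else
      pvLANGS.foldl (fun acc lang =>
        if pvTruthyStripped (pvAssocGetD d lang "") then PySem.Set.add acc lang else acc)
        (pvVolSet volumes)

def languages_from_text_alt (text_by_lang : Option (List (String × String))) (volumes : Option (List (List (String × List (String × String))))) : List String :=
  let has := pvHasSet text_by_lang volumes
  let res := pvLANGS.filter (fun l => PySem.Set.contains has l)
  if res.isEmpty then pvLANGS else res

-- ===== PRECONDITION & SPEC =====
def Spec_languages_from_text (text_by_lang : Option (List (String × String))) (volumes : Option (List (List (String × List (String × String))))) (out : List String) : Prop := out = languages_from_text_alt text_by_lang volumes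
instance (text_by_lang : Option (List (String × String))) (volumes : Option (List (List (String × List (String × String))))) (out : List String) : Decidable (Spec_languages_from_text text_by_lang volumes out) := by unfold Spec_languages_from_text; infer_instance

-- ===== CLAIM (what is proved, stated in full; the proofs are below) =====
def Claim_equal_languages_from_text : Prop := ∀ (text_by_lang : Option (List (String × String))) (volumes : Option (List (List (String × List (String × String))))), Dom_languages_from_text text_by_lang volumes → Spec_languages_from_text text_by_lang volumes (languages_from_text text_by_lang volumes)

-- ===== LEMMAS AND PROOFS =====

-- membership in a fold of conditional adds
theorem mem_foldl_condAdds {α β : Type} [BEq β] [LawfulBEq β]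
    (step : PySem.Set β → α → PySem.Set β)
    (Q : β → α → Prop)
    (hstep : ∀ (s : PySem.Set β) (a : α) (y : β), y ∈ step s a ↔ y ∈ s ∨ Q y a)
    (l : List α) (s : PySem.Set β) (y : β) :
    y ∈ l.foldl step s ↔ y ∈ s ∨ ∃ a ∈ l, Q y a := by
  induction l generalizing s with
  | nil => simp
  | cons a l ih =>
    simp only [List.foldl_cons, ih, hstep]
    constructor
    · rintro (⟨h | h⟩ | ⟨b, hb, hq⟩)
      · exact Or.inl h
      · exact Or.inr ⟨a, by simp, h⟩
      · exact Or.inr ⟨b, by simp [hb], hq⟩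
    · rintro (h | ⟨b, hb, hq⟩)
      · exact Or.inl (Or.inl h)
      · rcases List.mem_cons.mp hb with rfl | hb
        · exact Or.inl (Or.inr hq)
        · exact Or.inr ⟨b, hb, hq⟩

theorem mem_condAdd {β : Type} [BEq β] [LawfulBEq β]
    (s : PySem.Set β) (c : Bool) (x y : β) :
    y ∈ (if c then PySem.Set.add s x else s) ↔ y ∈ s ∨ (c = true ∧ y = x) := by
  by_cases hc : c = true <;> simp [hc, PySem.Set.mem_add]

-- membership in an inner loop over the literal pvLANGS
theorem mem_langsFold (p : String → Bool) (s : PySem.Set String) (y : String) :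
    y ∈ pvLANGS.foldl (fun acc lang => if p lang then PySem.Set.add acc lang else acc) s ↔
      y ∈ s ∨ (∃ l ∈ pvLANGS, p l = true ∧ y = l) := by
  simp only [pvLANGS, List.foldl_cons, List.foldl_nil, mem_condAdd]
  constructor
  · rintro (((h | h) | h) | h)
    · exact Or.inl h
    all_goals exact Or.inr ⟨_, by simp, h.1, h.2⟩
  · rintro (h | ⟨l, hl, hg, rfl⟩)
    · exact Or.inl (Or.inl (Or.inl h))
    · fin_cases hl
      · exact Or.inl (Or.inl (Or.inr ⟨hg, rfl⟩))
      · exact Or.inl (Or.inr ⟨hg, rfl⟩)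
      · exact Or.inr ⟨hg, rfl⟩

theorem mem_pvVolSet (volumes : Option (List (List (String × List (String × String))))) (y : String)
    (hy : y ∈ pvLANGS) : (y ∈ pvVolSet volumes ↔ pvCondVols volumes y = true) := by
  cases volumes with
  | none => simp [pvVolSet, pvCondVols, PySem.Set.empty]
  | some vs =>
    by_cases hvs : vs.isEmpty
    · simp [pvVolSet, pvCondVols, hvs, PySem.Set.empty]
    · simp only [pvVolSet, pvCondVols, hvs, Bool.false_eq_true, if_false, Bool.not_false, Bool.true_and]
      rw [mem_foldl_condAdds
        (Q := fun (y : String) (volume : List (String × List (String × String))) =>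
          ∃ l ∈ pvLANGS, pvTruthyStripped (pvAssocGetD (pvAssocGetD volume "text" []) l "") = true ∧ y = l)
        (hstep := fun s a yy =>
          mem_langsFold (fun l => pvTruthyStripped (pvAssocGetD (pvAssocGetD a "text" []) l "")) s yy)]
      simp only [PySem.Set.empty, List.not_mem_nil, false_or, List.any_eq_true]
      constructor
      · rintro ⟨v, hv, l, _, hT, rfl⟩
        exact ⟨v, hv, hT⟩
      · rintro ⟨v, hv, hT⟩
        exact ⟨v, hv, y, hy, hT, rfl⟩

theorem contains_pvHasSet (text_by_lang : Option (List (String × String)))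
    (volumes : Option (List (List (String × List (String × String))))) (y : String)
    (hy : y ∈ pvLANGS) :
    PySem.Set.contains (pvHasSet text_by_lang volumes) y =
      (pvCondTbl text_by_lang y || pvCondVols volumes y) := by
  have hmem : y ∈ pvHasSet text_by_lang volumes ↔
      (pvCondTbl text_by_lang y = true ∨ pvCondVols volumes y = true) := by
    cases text_by_lang with
    | none =>
      simp only [pvHasSet, pvCondTbl, Bool.false_eq_true, false_or]
      exact mem_pvVolSet volumes y hy
    | some d =>
      by_cases hd : d.isEmpty
      · simp only [pvHasSet, pvCondTbl, hd, if_true, Bool.not_true, Bool.false_and,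
          Bool.false_eq_true, false_or]
        exact mem_pvVolSet volumes y hy
      · simp only [pvHasSet, pvCondTbl, hd, Bool.false_eq_true, if_false, Bool.not_false, Bool.true_and]
        rw [mem_langsFold (fun l => pvTruthyStripped (pvAssocGetD d l "")), mem_pvVolSet volumes y hy]
        constructor
        · rintro (h | ⟨l, _, hT, rfl⟩)
          · exact Or.inr h
          · exact Or.inl hT
        · rintro (h | h)
          · exact Or.inr ⟨y, hy, h, rfl⟩
          · exact Or.inl h
  rcases Bool.eq_false_or_eq_true ((pvHasSet text_by_lang volumes).contains y) with ht | hf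
  · rw [ht]; symm
    rw [Bool.or_eq_true]
    exact hmem.mp ((PySem.Set.contains_iff _ _).mp ht)
  · rw [hf]; symm
    rw [Bool.or_eq_false_iff]
    have hnot : ¬ y ∈ pvHasSet text_by_lang volumes := by
      intro h
      have hc := (PySem.Set.contains_iff (pvHasSet text_by_lang volumes) y).mpr h
      rw [hf] at hc
      exact Bool.false_ne_true hc
    rw [hmem] at hnot
    exact ⟨Bool.eq_false_iff.mpr (fun h => hnot (Or.inl h)),
           Bool.eq_false_iff.mpr (fun h => hnot (Or.inr h))⟩

-- ===== VERDICT (by name: the statement is the Claim_ definition above) =====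
theorem languages_from_text_spec : Claim_equal_languages_from_text := by
  intro text_by_lang volumes _
  unfold Spec_languages_from_text languages_from_text languages_from_text_alt
  have hru := contains_pvHasSet text_by_lang volumes "ru" (by simp [pvLANGS])
  have hen := contains_pvHasSet text_by_lang volumes "en" (by simp [pvLANGS])
  have hzh := contains_pvHasSet text_by_lang volumes "zh" (by simp [pvLANGS])
  simp only [pvLANGS, List.foldl_cons, List.foldl_nil, List.filter, hru, hen, hzh]
  cases h1 : pvCondTbl text_by_lang "ru" <;> cases h2 : pvCondVols volumes "ru" <;>
    cases h3 : pvCondTbl text_by_lang "en" <;> cases h4 : pvCondVols volumes "en" <;>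
    cases h5 : pvCondTbl text_by_lang "zh" <;> cases h6 : pvCondVols volumes "zh" <;>
    simp
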